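-- pv_equiv track=rewrite | github.com/githubuser2000/devdev | ganzPerfektoidpAdisch.py | p_adic_to_int
-- ===== SOURCE A (Python) =====
-- from typing import List, Tuple
--
-- def p_adic_to_int(digits: List[int], p: int) -> int:
--     """
--     Reconstruct the integer modulo p^k from p-adic digits.
--     (Finite truncation = approximation of the p-adic number.)
--     """
--     value = 0
--     power = 1
--     for a in digits:
--         if not (0 <= a < p):
--             raise ValueError("digit outside [0,p).")
--         value += a * power
--         power *= p
--     return value
-- ===== SOURCE B (Python) =====
-- def p_adic_to_int(digits, p):
--     """Validate all digits up front, then evaluate recursively: value = d0 + p * value(rest)."""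
--     if any(not (0 <= a < p) for a in digits):
--         raise ValueError("digit outside [0,p).")
--
--     def go(ds):
--         if not ds:
--             return 0
--         return ds[0] + p * go(ds[1:])
--
--     return go(digits)
-- ===== Notes on version B (the rewrite author's own statement) =====
-- stated objective: alternative
-- what changed: Splits the work into a separate up-front validation pass over all digits and a pure recursive evaluation d0 + p*value(rest), instead of A's single imperative loop maintaining a (value, power) accumulator pair.
import Mathlib
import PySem

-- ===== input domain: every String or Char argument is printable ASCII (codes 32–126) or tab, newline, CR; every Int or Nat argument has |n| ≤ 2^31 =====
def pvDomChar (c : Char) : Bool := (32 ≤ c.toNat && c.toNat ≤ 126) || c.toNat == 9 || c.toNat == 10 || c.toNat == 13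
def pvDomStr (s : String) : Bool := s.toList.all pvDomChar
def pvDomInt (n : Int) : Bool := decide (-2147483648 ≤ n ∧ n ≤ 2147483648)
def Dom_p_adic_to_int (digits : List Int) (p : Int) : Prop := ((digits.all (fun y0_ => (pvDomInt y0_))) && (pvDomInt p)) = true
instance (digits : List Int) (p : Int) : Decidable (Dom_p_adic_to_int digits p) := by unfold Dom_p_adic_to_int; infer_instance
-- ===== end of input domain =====

-- B validates all digits in one up-front pass, then evaluates the value by the pure
-- recursion d0 + p * value(rest); A keeps a (value, power) pair inside one loop.

-- ===== PORT A =====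
-- loop over digits with state (value, power); none = ValueError on a digit outside [0,p)
def pAdicLoopA : List Int → Int → Int × Int → Option (Int × Int)
  | [], _, st => some st
  | a :: rest, p, (value, power) =>
      if 0 ≤ a ∧ a < p then pAdicLoopA rest p (value + a * power, power * p) else none

def p_adic_to_int (digits : List Int) (p : Int) : Int :=
  ((pAdicLoopA digits p (0, 1)).map Prod.fst).getD 0

-- ===== PORT B =====
-- the recursive helper go: go [] = 0, go (d :: ds) = d + p * go ds
def pAdicGo (p : Int) : List Int → Int
  | [] => 0
  | a :: rest => a + p * pAdicGo p rest

-- up-front validation (the `any not (0 <= a < p)` pass raising ValueError), then pAdicGo;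
-- 0 stands in for the raising branch, which Pre_ excludes
def p_adic_to_int_alt (digits : List Int) (p : Int) : Int :=
  if digits.any (fun a => !(decide (0 ≤ a) && decide (a < p))) then 0
  else pAdicGo p digits

-- ===== PRECONDITION & SPEC =====
-- Pre_ excludes exactly the inputs on which A raises ValueError: some digit outside [0,p).
def Pre_p_adic_to_int (digits : List Int) (p : Int) : Prop :=
  ∀ a ∈ digits, 0 ≤ a ∧ a < p
instance (digits : List Int) (p : Int) : Decidable (Pre_p_adic_to_int digits p) := by
  unfold Pre_p_adic_to_int; infer_instance

def pvWitness_p_adic_to_int : List Int × Int := ([1, 0, 2], 3)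

def Spec_p_adic_to_int (digits : List Int) (p : Int) (out : Int) : Prop := out = p_adic_to_int_alt digits p
instance (digits : List Int) (p : Int) (out : Int) : Decidable (Spec_p_adic_to_int digits p out) := by unfold Spec_p_adic_to_int; infer_instance

-- ===== CLAIM (what is proved, stated in full; the proofs are below) =====
def Claim_equal_p_adic_to_int : Prop := ∀ (digits : List Int) (p : Int), Dom_p_adic_to_int digits p → Pre_p_adic_to_int digits p → Spec_p_adic_to_int digits p (p_adic_to_int digits p)

-- ===== LEMMAS AND PROOFS =====

theorem pAdicLoopA_eq (p : Int) : ∀ (l : List Int), (∀ a ∈ l, 0 ≤ a ∧ a < p) →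
    ∀ v w : Int, pAdicLoopA l p (v, w) = some (v + w * pAdicGo p l, w * p ^ l.length) := by
  intro l
  induction l with
  | nil => intro _ v w; simp [pAdicLoopA, pAdicGo]
  | cons a rest ih =>
      intro h v w
      have ha := h a (by simp)
      simp only [pAdicLoopA, if_pos ha]
      rw [ih (fun b hb => h b (by simp [hb]))]
      simp only [pAdicGo, List.length_cons, pow_succ, Option.some.injEq, Prod.mk.injEq]
      constructor <;> ring

-- ===== VERDICT (by name: the statement is the Claim_ definition above) =====
theorem p_adic_to_int_spec : Claim_equal_p_adic_to_int := by
  intro digits p _ hpre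
  unfold Spec_p_adic_to_int p_adic_to_int
  rw [pAdicLoopA_eq p digits hpre 0 1]
  have : digits.any (fun a => !(decide (0 ≤ a) && decide (a < p))) = false := by
    simp only [List.any_eq_false, Bool.not_eq_true', Bool.and_eq_true, decide_eq_true_eq,
      Bool.not_eq_false]
    exact hpre
  rw [p_adic_to_int_alt, this]
  simp
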